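-- pv_equiv track=rewrite | github.com/schnock-art/pixel-sheriff | apps/api/src/sheriff_api/services/prelabels.py | _category_alias_keys
-- ===== SOURCE A (Python) =====
-- _PRELABEL_ALIAS_LOOKUP: dict[str, set[str]] = {}
--
-- def _normalize_prelabel_label_key(value: str | None) -> str:
--     chunks: list[str] = []
--     current: list[str] = []
--     for char in str(value or ""):
--         if char.isalnum():
--             current.append(char.lower())
--             continue
--         if current:
--             chunks.append("".join(current))
--             current = []
--     if current:
--         chunks.append("".join(current))
--     return " ".join(chunks)
--
-- def _inflection_alias_keys(normalized: str) -> set[str]: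
--     keys: set[str] = set()
--     if not normalized:
--         return keys
--
--     if normalized.endswith("ies") and len(normalized) > 4:
--         keys.add(f"{normalized[:-3]}y")
--     if normalized.endswith("sses") and len(normalized) > 5:
--         keys.add(normalized[:-2])
--     elif normalized.endswith(("ches", "shes", "xes", "zes")) and len(normalized) > 4:
--         keys.add(normalized[:-2])
--     if normalized.endswith("s") and len(normalized) > 3 and not normalized.endswith("ss"):
--         keys.add(normalized[:-1])
--
--     if normalized.endswith("y") and len(normalized) > 1 and normalized[-2] not in {"a", "e", "i", "o", "u"}:
--         keys.add(f"{normalized[:-1]}ies")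
--     elif normalized.endswith(("s", "x", "z", "ch", "sh")):
--         keys.add(f"{normalized}es")
--     else:
--         keys.add(f"{normalized}s")
--     return {key for key in keys if key and key != normalized}
--
-- def _category_exact_keys(value: str | None) -> list[str]:
--     normalized = _normalize_prelabel_label_key(value)
--     if not normalized:
--         return []
--     keys = [normalized]
--     collapsed = normalized.replace(" ", "")
--     if collapsed and collapsed != normalized:
--         keys.append(collapsed)
--     return keys
--
-- def _category_alias_keys(value: str | None) -> set[str]:
--     normalized = _normalize_prelabel_label_key(value)
--     if not normalized:
--         return set()
--
--     keys: set[str] = set()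
--     collapsed = normalized.replace(" ", "")
--     if collapsed and collapsed != normalized:
--         keys.add(collapsed)
--     keys.update(_inflection_alias_keys(normalized))
--     for alias in _PRELABEL_ALIAS_LOOKUP.get(normalized, set()):
--         alias_key = _normalize_prelabel_label_key(alias)
--         if not alias_key:
--             continue
--         keys.add(alias_key)
--         collapsed_alias = alias_key.replace(" ", "")
--         if collapsed_alias and collapsed_alias != alias_key:
--             keys.add(collapsed_alias)
--         keys.update(_inflection_alias_keys(alias_key))
--     return keys - set(_category_exact_keys(value))
-- ===== SOURCE B (Python) =====
-- _PRELABEL_ALIAS_LOOKUP: dict[str, set[str]] = {}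
--
-- def _candidate_inflections(source):
--     """Yield the raw inflected forms of a normalized key, in rule order."""
--     n = len(source)
--     if source.endswith("ies") and n > 4:
--         yield source[:-3] + "y"
--     if (source.endswith("sses") and n > 5) or (
--         source.endswith(("ches", "shes", "xes", "zes")) and n > 4
--     ):
--         yield source[:-2]
--     if source.endswith("s") and n > 3 and not source.endswith("ss"):
--         yield source[:-1]
--     if source.endswith("y") and n > 1 and source[-2] not in "aeiou":
--         yield source[:-1] + "ies"
--     elif source.endswith(("s", "x", "z", "ch", "sh")):
--         yield source + "es"
--     else:
--         yield source + "s"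
--
-- def _category_alias_keys(value):
--     translated = "".join(
--         c.lower() if c.isalnum() else " " for c in str(value or "")
--     )
--     normalized = " ".join(translated.split())
--     if not normalized:
--         return set()
--     collapsed = normalized.replace(" ", "")
--     return {
--         key
--         for key in _candidate_inflections(normalized)
--         if key not in (normalized, collapsed)
--     }
-- ===== Notes on version B (the rewrite author's own statement) =====
-- stated objective: simpler
-- what changed: B normalizes by translating each char to its lowercase-or-space image and joining str.split() words (instead of A's chunks/current accumulator loop), generates the inflected candidate forms with a single flat generator (the sses/ches elif collapsed into one or-condition), and returns one filtered set comprehension over those candidates, eliminating A's set add/update/difference machinery, the _category_exact_keys recomputation (which re-runs normalization) and the dead loop over the empty _PRELABEL_ALIAS_LOOKUP.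
import Mathlib
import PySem

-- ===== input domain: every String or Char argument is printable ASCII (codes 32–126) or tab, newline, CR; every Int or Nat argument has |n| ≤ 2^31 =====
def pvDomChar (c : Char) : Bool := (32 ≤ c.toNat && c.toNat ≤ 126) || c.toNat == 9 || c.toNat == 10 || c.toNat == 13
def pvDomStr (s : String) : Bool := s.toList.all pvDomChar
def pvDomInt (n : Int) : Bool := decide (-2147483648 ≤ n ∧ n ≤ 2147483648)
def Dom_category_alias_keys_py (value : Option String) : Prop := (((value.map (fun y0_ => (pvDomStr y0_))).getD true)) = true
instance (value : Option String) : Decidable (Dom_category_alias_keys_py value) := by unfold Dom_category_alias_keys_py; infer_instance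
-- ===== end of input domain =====

-- B is a simpler decomposition of A: one normalization by translate-and-split, one candidate
-- generator, one filtered set comprehension — no set-update/subtract machinery and no dead
-- alias-lookup loop (the module's _PRELABEL_ALIAS_LOOKUP is the empty dict).

-- ===== PORT A =====
-- str(value or "")
def pvStrOrEmpty (value : Option String) : List Char :=
  match value with
  | none => []
  | some s => s.toList

-- _normalize_prelabel_label_key, the chunks/current loop, applied to an already-str argument
def pvNormCoreA (cs : List Char) : List Char :=
  let st := cs.foldl
    (fun (st : List (List Char) × List Char) c =>
      if PySem.Chars.isalnum c then (st.1, st.2 ++ [PySem.Chars.lowerChar c])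
      else if st.2.isEmpty then st else (st.1 ++ [st.2], []))
    ([], [])
  let chunks := if st.2.isEmpty then st.1 else st.1 ++ [st.2]
  PySem.Chars.join [' '] chunks

-- _inflection_alias_keys
def pvInflectionA (s : List Char) : PySem.Set (List Char) :=
  if s.isEmpty then PySem.Set.empty
  else
    let keys : PySem.Set (List Char) := PySem.Set.empty
    let keys := if PySem.Chars.endswith s ['i','e','s'] && decide (4 < s.length)
      then PySem.Set.add keys (PySem.List.slice s none (some (-3)) ++ ['y']) else keys
    let keys := if PySem.Chars.endswith s ['s','s','e','s'] && decide (5 < s.length)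
      then PySem.Set.add keys (PySem.List.slice s none (some (-2)))
      else if (PySem.Chars.endswith s ['c','h','e','s'] || PySem.Chars.endswith s ['s','h','e','s']
            || PySem.Chars.endswith s ['x','e','s'] || PySem.Chars.endswith s ['z','e','s'])
          && decide (4 < s.length)
      then PySem.Set.add keys (PySem.List.slice s none (some (-2))) else keys
    let keys := if PySem.Chars.endswith s ['s'] && decide (3 < s.length) && !PySem.Chars.endswith s ['s','s']
      then PySem.Set.add keys (PySem.List.slice s none (some (-1))) else keys
    let keys := if PySem.Chars.endswith s ['y'] && decide (1 < s.length)
          && !((['a','e','i','o','u'] : List Char).contains ((PySem.List.pyGet? s (-2)).getD 'a'))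
      then PySem.Set.add keys (PySem.List.slice s none (some (-1)) ++ ['i','e','s'])
      else if PySem.Chars.endswith s ['s'] || PySem.Chars.endswith s ['x'] || PySem.Chars.endswith s ['z']
          || PySem.Chars.endswith s ['c','h'] || PySem.Chars.endswith s ['s','h']
      then PySem.Set.add keys (s ++ ['e','s'])
      else PySem.Set.add keys (s ++ ['s'])
    PySem.Set.ofList (keys.filter (fun k => !k.isEmpty && !(k == s)))

-- _category_exact_keys
def pvCategoryExactA (value : Option String) : List (List Char) :=
  let n := pvNormCoreA (pvStrOrEmpty value)
  if n.isEmpty then []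
  else
    let keys := [n]
    let col := PySem.Chars.replace n [' '] []
    if !col.isEmpty && !(col == n) then keys ++ [col] else keys

-- _category_alias_keys; _PRELABEL_ALIAS_LOOKUP is the module's (empty) dict literal
def category_alias_keys_py (value : Option String) : List String :=
  let n := pvNormCoreA (pvStrOrEmpty value)
  if n.isEmpty then []
  else
    let keys : PySem.Set (List Char) := PySem.Set.empty
    let col := PySem.Chars.replace n [' '] []
    let keys := if !col.isEmpty && !(col == n) then PySem.Set.add keys col else keys
    let keys := PySem.Set.update keys (pvInflectionA n)
    let keys := (PySem.Dict.getD (PySem.Dict.empty : PySem.Dict (List Char) (PySem.Set (List Char))) n PySem.Set.empty).foldl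
      (fun keys al =>
        let ak := pvNormCoreA al
        if ak.isEmpty then keys
        else
          let keys := PySem.Set.add keys ak
          let colA := PySem.Chars.replace ak [' '] []
          let keys := if !colA.isEmpty && !(colA == ak) then PySem.Set.add keys colA else keys
          PySem.Set.update keys (pvInflectionA ak)) keys
    (PySem.Set.diff keys (PySem.Set.ofList (pvCategoryExactA value))).map String.ofList

-- ===== PORT B =====
-- _candidate_inflections: the raw inflected forms, in rule order
def pvCandidatesB (s : List Char) : List (List Char) :=
  (if PySem.Chars.endswith s ['i','e','s'] && decide (4 < s.length)
   then [PySem.List.slice s none (some (-3)) ++ ['y']] else []) ++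
  (if (PySem.Chars.endswith s ['s','s','e','s'] && decide (5 < s.length))
      || ((PySem.Chars.endswith s ['c','h','e','s'] || PySem.Chars.endswith s ['s','h','e','s']
           || PySem.Chars.endswith s ['x','e','s'] || PySem.Chars.endswith s ['z','e','s'])
          && decide (4 < s.length))
   then [PySem.List.slice s none (some (-2))] else []) ++
  (if PySem.Chars.endswith s ['s'] && decide (3 < s.length) && !PySem.Chars.endswith s ['s','s']
   then [PySem.List.slice s none (some (-1))] else []) ++
  (if PySem.Chars.endswith s ['y'] && decide (1 < s.length)
      && !((['a','e','i','o','u'] : List Char).contains ((PySem.List.pyGet? s (-2)).getD 'a'))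
   then [PySem.List.slice s none (some (-1)) ++ ['i','e','s']]
   else if PySem.Chars.endswith s ['s'] || PySem.Chars.endswith s ['x'] || PySem.Chars.endswith s ['z']
       || PySem.Chars.endswith s ['c','h'] || PySem.Chars.endswith s ['s','h']
   then [s ++ ['e','s']]
   else [s ++ ['s']])

-- " ".join(translated.split()) over the lower-or-space translation
def pvNormalizeB (value : Option String) : List Char :=
  PySem.Chars.join [' ']
    (PySem.Chars.split₀
      ((pvStrOrEmpty value).map (fun c => if PySem.Chars.isalnum c then PySem.Chars.lowerChar c else ' ')))

def category_alias_keys_py_alt (value : Option String) : List String :=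
  let n := pvNormalizeB value
  if n.isEmpty then []
  else
    let col := PySem.Chars.replace n [' '] []
    (PySem.Set.ofList
      ((pvCandidatesB n).filter (fun k => !(k == n || k == col)))).map String.ofList

-- ===== PRECONDITION & SPEC =====
def Spec_category_alias_keys_py (value : Option String) (out : List String) : Prop := out = category_alias_keys_py_alt value
instance (value : Option String) (out : List String) : Decidable (Spec_category_alias_keys_py value out) := by unfold Spec_category_alias_keys_py; infer_instance

-- ===== CLAIM (what is proved, stated in full; the proofs are below) =====
def Claim_equal_category_alias_keys_py : Prop := ∀ (value : Option String), Dom_category_alias_keys_py value → Spec_category_alias_keys_py value (category_alias_keys_py value)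

-- ===== LEMMAS AND PROOFS =====

-- the sequence of alphanumeric "words" of the input, lower-cased, with `cur` the open chunk
def pvWords (cur : List Char) : List Char → List (List Char)
  | [] => if cur.isEmpty then [] else [cur]
  | c :: cs =>
      if PySem.Chars.isalnum c then pvWords (cur ++ [PySem.Chars.lowerChar c]) cs
      else if cur.isEmpty then pvWords [] cs else cur :: pvWords [] cs

lemma pvLower_not_space (c : Char) (h : PySem.Chars.isalnum c = true) :
    PySem.Chars.isspace (PySem.Chars.lowerChar c) = false := by
  simp only [PySem.Chars.isalnum, PySem.Chars.isalpha, PySem.Chars.isdigit, PySem.Chars.isupper,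
    PySem.Chars.islower, Bool.or_eq_true, Bool.and_eq_true, decide_eq_true_eq] at h
  unfold PySem.Chars.lowerChar PySem.Chars.isspace PySem.Chars.isupper
  rcases h with (⟨h1, h2⟩ | ⟨h1, h2⟩) | ⟨h1, h2⟩ <;> simp only [Char.le_def] at h1 h2
  · -- uppercase letter: lowerChar adds 32, landing in 97..122
    change (65 : Nat) ≤ c.toNat at h1; change c.toNat ≤ (90 : Nat) at h2
    rw [if_pos (by simp only [Bool.and_eq_true, decide_eq_true_eq, Char.le_def]; exact ⟨h1, h2⟩)]
    have hv : (Char.ofNat (c.toNat + 32)).toNat = c.toNat + 32 := by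
      rw [Char.toNat_ofNat, if_pos]; exact Or.inl (by omega)
    simp only [hv, Bool.or_eq_false_iff, Bool.and_eq_false_iff, decide_eq_false_iff_not]; omega
  · -- lowercase letter: lowerChar is the identity
    change (97 : Nat) ≤ c.toNat at h1; change c.toNat ≤ (122 : Nat) at h2
    rw [if_neg (by simp only [Bool.and_eq_true, decide_eq_true_eq, Char.le_def, not_and]
                   intro _ hx; change c.toNat ≤ (90 : Nat) at hx; omega)]
    simp only [Bool.or_eq_false_iff, Bool.and_eq_false_iff, decide_eq_false_iff_not]; omega
  · -- digit: lowerChar is the identity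
    change (48 : Nat) ≤ c.toNat at h1; change c.toNat ≤ (57 : Nat) at h2
    rw [if_neg (by simp only [Bool.and_eq_true, decide_eq_true_eq, Char.le_def, not_and]
                   intro hx; change (65 : Nat) ≤ c.toNat at hx; omega)]
    simp only [Bool.or_eq_false_iff, Bool.and_eq_false_iff, decide_eq_false_iff_not]; omega

lemma pvFoldA_eq (cs : List Char) : ∀ (chunks : List (List Char)) (cur : List Char),
    (let st := cs.foldl
      (fun (st : List (List Char) × List Char) c =>
        if PySem.Chars.isalnum c then (st.1, st.2 ++ [PySem.Chars.lowerChar c])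
        else if st.2.isEmpty then st else (st.1 ++ [st.2], []))
      (chunks, cur);
     if st.2.isEmpty then st.1 else st.1 ++ [st.2]) = chunks ++ pvWords cur cs := by
  induction cs with
  | nil =>
      intro chunks cur
      simp only [List.foldl_nil, pvWords]
      cases h : cur.isEmpty <;> simp [h]
  | cons c cs ih =>
      intro chunks cur
      simp only [List.foldl_cons, pvWords]
      by_cases ha : PySem.Chars.isalnum c
      · simp only [ha, if_true, ih]
      · simp only [ha, if_false, Bool.false_eq_true]
        cases hc : cur.isEmpty
        · simp only [Bool.false_eq_true, if_false, ih, List.append_assoc, List.cons_append,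
            List.nil_append]
        · simp only [if_true, ih, List.isEmpty_iff.mp hc]

lemma pvGo_eq (cs : List Char) : ∀ (cur : List Char) (acc : List (List Char)),
    PySem.Chars.split₀.go (cs.map (fun c => if PySem.Chars.isalnum c then PySem.Chars.lowerChar c else ' ')) cur acc
      = acc.reverse ++ pvWords cur.reverse cs := by
  induction cs with
  | nil =>
      intro cur acc
      rw [List.map_nil, PySem.Chars.split₀.go]
      cases h : cur.isEmpty
      · have : cur.reverse.isEmpty = false := by simpa using h
        simp [pvWords, this, h]
      · have : cur.reverse.isEmpty = true := by simpa using h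
        simp [pvWords, this, h]
  | cons c cs ih =>
      intro cur acc
      rw [List.map_cons, PySem.Chars.split₀.go]
      by_cases ha : PySem.Chars.isalnum c
      · simp only [ha, if_true, pvLower_not_space c ha, Bool.false_eq_true, if_false,
          pvWords, ih, List.reverse_cons]
      · have hsp : PySem.Chars.isspace ' ' = true := by decide
        simp only [ha, Bool.false_eq_true, if_false, hsp, if_true]
        cases hc : cur.isEmpty
        · have hcr : cur.reverse.isEmpty = false := by simpa using hc
          simp only [hc, Bool.false_eq_true, if_false, ih, List.reverse_cons, pvWords, ha,
            hcr, List.append_assoc, List.singleton_append]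
          simp
        · have hcr : cur.reverse.isEmpty = true := by simpa using hc
          simp only [hc, if_true, ih, pvWords, ha, Bool.false_eq_true, if_false, hcr,
            List.reverse_nil]

lemma pvNorm_eq (value : Option String) :
    pvNormalizeB value = pvNormCoreA (pvStrOrEmpty value) := by
  unfold pvNormalizeB pvNormCoreA PySem.Chars.split₀
  rw [pvGo_eq]
  have h := pvFoldA_eq (pvStrOrEmpty value) [] []
  simp only [List.reverse_nil] at h ⊢
  rw [← h]

lemma pvOfListFilter {α : Type} [BEq α] [LawfulBEq α] (l : List α) (p : α → Bool) :
    PySem.Set.ofList (l.filter p) = (PySem.Set.ofList l).filter p := by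
  induction l using List.reverseRecOn with
  | nil => simp [PySem.Set.ofList, PySem.Set.empty]
  | append_singleton l x ih =>
      rw [List.filter_append, List.filter_cons, List.filter_nil,
        PySem.Set.ofList_append_singleton]
      cases hp : p x
      · simp only [Bool.false_eq_true, if_false, List.append_nil, ih]
        by_cases hm : x ∈ PySem.Set.ofList l
        · rw [PySem.Set.add_of_mem hm]
        · rw [PySem.Set.add_of_not_mem hm, List.filter_append, List.filter_cons, hp]
          simp
      · simp only [if_true, PySem.Set.ofList_append_singleton, ih]
        by_cases hm : x ∈ PySem.Set.ofList l
        · rw [PySem.Set.add_of_mem hm,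
            PySem.Set.add_of_mem (List.mem_filter.mpr ⟨hm, hp⟩)]
        · rw [PySem.Set.add_of_not_mem hm,
            PySem.Set.add_of_not_mem (fun hmem => hm (List.mem_of_mem_filter hmem)),
            List.filter_append, List.filter_cons, hp]
          simp

lemma pvOfListFilterOfList {α : Type} [BEq α] [LawfulBEq α] (l : List α) (p : α → Bool) :
    PySem.Set.ofList ((PySem.Set.ofList l).filter p) = PySem.Set.ofList (l.filter p) := by
  rw [PySem.Set.ofList_eq_self_of_nodup _
    (List.Nodup.filter _ (PySem.Set.nodup_ofList l))]
  exact (pvOfListFilter l p).symm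

lemma pvSliceTake (s : List Char) (k : Nat) (h0 : 0 < k) (hk : k ≤ s.length) :
    PySem.List.slice s none (some (-(k:Int))) = s.take (s.length - k) := by
  simp only [PySem.List.slice, PySem.List.clampIdx]
  split
  · split
    · next h1 h2 => omega
    · congr 1
      omega
  · next h => exact absurd (by omega : -(k:Int) < 0) h

lemma pvTakeNe (s : List Char) (m : Nat) (h0 : 0 < m) (hs : m ≤ s.length) : s.take m ≠ [] := by
  intro h
  rcases List.take_eq_nil_iff.mp h with h1 | h1
  · omega
  · rw [h1] at hs; simp at hs; omega

lemma pvCandsNonempty (s : List Char) (k : List Char) (hk : k ∈ pvCandidatesB s) : k ≠ [] := by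
  unfold pvCandidatesB at hk
  simp only [List.mem_append] at hk
  rcases hk with ((h | h) | h) | h
  · split at h
    · rw [List.mem_singleton.mp h]; simp
    · exact absurd h (List.not_mem_nil)
  · split at h
    · next hc =>
        rw [List.mem_singleton.mp h]
        have h4 : 4 < s.length := by
          rcases Bool.or_eq_true_iff.mp hc with hl | hl <;>
            rcases Bool.and_eq_true_iff.mp hl with ⟨_, hd⟩ <;>
            simp only [decide_eq_true_eq] at hd <;> omega
        have hsl := pvSliceTake s 2 (by omega) (by omega)
        norm_num at hsl
        rw [hsl]
        exact pvTakeNe s (s.length - 2) (by omega) (by omega)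
    · exact absurd h (List.not_mem_nil)
  · split at h
    · next hc =>
        rw [List.mem_singleton.mp h]
        have h3 : 3 < s.length := by
          rcases Bool.and_eq_true_iff.mp hc with ⟨hl, _⟩
          rcases Bool.and_eq_true_iff.mp hl with ⟨_, hd⟩
          simp only [decide_eq_true_eq] at hd; omega
        have hsl := pvSliceTake s 1 (by omega) (by omega)
        norm_num at hsl
        rw [hsl]
        exact pvTakeNe s (s.length - 1) (by omega) (by omega)
    · exact absurd h (List.not_mem_nil)
  · split at h
    · rw [List.mem_singleton.mp h]; simp
    · split at h
      · rw [List.mem_singleton.mp h]; simp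
      · rw [List.mem_singleton.mp h]; simp

lemma pvIfAdd (k : PySem.Set (List Char)) (c : Bool) (v : List Char) :
    (if c then PySem.Set.add k v else k) = List.foldl PySem.Set.add k (if c then [v] else []) := by
  cases c <;> simp

lemma pvIfAdd2 (k : PySem.Set (List Char)) (c d : Bool) (v : List Char) :
    (if c then PySem.Set.add k v else if d then PySem.Set.add k v else k)
      = List.foldl PySem.Set.add k (if c || d then [v] else []) := by
  cases c <;> cases d <;> simp

lemma pvIfAdd3 (k : PySem.Set (List Char)) (c d : Bool) (v w u : List Char) :
    (if c then PySem.Set.add k v else if d then PySem.Set.add k w else PySem.Set.add k u)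
      = List.foldl PySem.Set.add k (if c then [v] else if d then [w] else [u]) := by
  cases c <;> cases d <;> simp

lemma pvMainEq (n col : List Char) (hne : n.isEmpty = false)
    (hS : pvInflectionA n
      = PySem.Set.ofList ((pvCandidatesB n).filter (fun k => !k.isEmpty && !(k == n))))
    (hno : ∀ k ∈ pvCandidatesB n, k ≠ []) :
    ((if (!col.isEmpty && !(col == n)) = true then PySem.Set.add PySem.Set.empty col else PySem.Set.empty).update
        (pvInflectionA n)).diff
      (PySem.Set.ofList (if (!col.isEmpty && !(col == n)) = true then [n] ++ [col] else [n]))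
    = PySem.Set.ofList ((pvCandidatesB n).filter (fun k => !(k == n || k == col))) := by
  rw [hS]
  have hker : ∀ k : List Char, k ∈ pvCandidatesB n → k.isEmpty = false := by
    intro k hk
    cases hkk : k with
    | nil => exact absurd hkk (hno k hk)
    | cons a l => rfl
  cases hb : (!col.isEmpty && !(col == n))
  · -- collapsed is empty or equal to normalized: only {n} is subtracted
    simp only [hb, Bool.false_eq_true, if_false]
    rw [show (PySem.Set.empty : PySem.Set (List Char)) = ([] : List (List Char)) from rfl,
      PySem.Set.update_nil_left, PySem.Set.ofList_ofList]
    unfold PySem.Set.diff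
    rw [PySem.Set.ofList_eq_self_of_nodup [n] (by simp), ← pvOfListFilter, List.filter_filter]
    refine congrArg PySem.Set.ofList (List.filter_congr ?_)
    intro k hk
    have hke := hker k hk
    rcases Bool.and_eq_false_iff.mp hb with h1 | h1
    · -- col = []
      have hcn : col = [] := by
        cases hcc : col.isEmpty with
        | true => exact List.isEmpty_iff.mp hcc
        | false => rw [hcc] at h1; simp at h1
      subst hcn
      by_cases hkn : k = n <;> simp [hkn, hke]
    · -- col = n
      have hcn : col = n := by simpa using h1
      rw [hcn]
      by_cases hkn : k = n <;> simp [hkn, hke]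
  · -- collapsed is a distinct nonempty key: it is inserted first and subtracted again
    simp only [hb, if_true]
    obtain ⟨hc1, hc2⟩ := Bool.and_eq_true_iff.mp hb
    have hcoln : col ≠ n := by simpa using hc2
    rw [PySem.Set.add_of_not_mem (by simp : col ∉ (PySem.Set.empty : PySem.Set (List Char)))]
    rw [show (PySem.Set.empty : PySem.Set (List Char)) ++ [col] = [col] from rfl]
    rw [PySem.Set.update_eq_append_filter, PySem.Set.ofList_ofList]
    unfold PySem.Set.diff
    rw [PySem.Set.ofList_eq_self_of_nodup ([n] ++ [col]) (by simp [Ne.symm hcoln])]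
    rw [List.filter_append, ← pvOfListFilter, List.filter_filter, ← pvOfListFilter,
      List.filter_filter]
    have hcolgone : List.filter (fun x => !(PySem.Set.contains ([n] ++ [col]) x)) [col] = [] := by
      simp
    rw [hcolgone, List.nil_append]
    refine congrArg PySem.Set.ofList (List.filter_congr ?_)
    intro k hk
    have hke := hker k hk
    by_cases hkn : k = n <;> by_cases hkc : k = col <;> simp [hkn, hkc, hke]

lemma pvInflA_eq (s : List Char) (hs : s.isEmpty = false) :
    pvInflectionA s
      = PySem.Set.ofList ((pvCandidatesB s).filter (fun k => !k.isEmpty && !(k == s))) := by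
  unfold pvInflectionA pvCandidatesB
  simp only [hs, Bool.false_eq_true, if_false]
  simp only [pvIfAdd3]
  simp only [pvIfAdd2]
  simp only [pvIfAdd]
  simp only [← List.foldl_append, List.append_assoc]
  exact pvOfListFilterOfList _ _

-- ===== VERDICT (by name: the statement is the Claim_ definition above) =====
theorem category_alias_keys_py_spec : Claim_equal_category_alias_keys_py := by
  intro value _
  show category_alias_keys_py value = category_alias_keys_py_alt value
  unfold category_alias_keys_py category_alias_keys_py_alt pvCategoryExactA
  rw [pvNorm_eq]
  cases hne : (pvNormCoreA (pvStrOrEmpty value)).isEmpty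
  case true => simp [hne]
  case false =>
  simp only [hne, Bool.false_eq_true, if_false]
  have hd : ((PySem.Dict.empty : PySem.Dict (List Char) (PySem.Set (List Char))).getD
        (pvNormCoreA (pvStrOrEmpty value)) PySem.Set.empty)
      = (PySem.Set.empty : PySem.Set (List Char)) := by
    simp [PySem.Dict.getD, PySem.Dict.empty, PySem.Dict.get?]
  rw [hd]
  rw [show (PySem.Set.empty : PySem.Set (List Char)) = ([] : List (List Char)) from rfl, List.foldl_nil]
  exact congrArg (List.map String.ofList)
    (pvMainEq _ _ hne (pvInflA_eq _ hne) (pvCandsNonempty _))
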